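-- pv_equiv track=rewrite | github.com/ethanstobbe/Poker_Coach | Poker_Trainer/backend/src/scengen/generate_bets.py | betting_order
-- ===== SOURCE A (Python) =====
-- PLAYER_COLS = [f"P{i}" for i in range(1, 9)]
--
-- POSITIONS = {
--     "P1": "BTN",
--     "P2": "SB",
--     "P3": "BB",
--     "P4": "UTG",
--     "P5": "UTG+1",
--     "P6": "MP",
--     "P7": "HJ",
--     "P8": "CO",
-- }
--
-- POSTFLOP_ORDER = ["SB", "BB", "UTG", "UTG+1", "MP", "HJ", "CO", "BTN"]
--
-- def active_players(row):
--     """Players who are still in hand preflop (not 'F')."""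
--     return [p for p in PLAYER_COLS if row.get(p, "F") != "F"]
--
-- def betting_order(row):
--     """Returns active players ordered SB->...->BTN."""
--     active = active_players(row)
--     ordered = []
--     for pos in POSTFLOP_ORDER:
--         for p in active:
--             if POSITIONS[p] == pos:
--                 ordered.append(p)
--     return ordered
-- ===== SOURCE B (Python) =====
-- PLAYER_COLS = [f"P{i}" for i in range(1, 9)]
--
-- POSITIONS = {
--     "P1": "BTN",
--     "P2": "SB",
--     "P3": "BB",
--     "P4": "UTG",
--     "P5": "UTG+1",
--     "P6": "MP",
--     "P7": "HJ",
--     "P8": "CO",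
-- }
--
-- POSTFLOP_ORDER = ["SB", "BB", "UTG", "UTG+1", "MP", "HJ", "CO", "BTN"]
--
-- ORDER_RANK = {pos: i for i, pos in enumerate(POSTFLOP_ORDER)}
--
-- def betting_order(row):
--     """Returns active players ordered SB->...->BTN."""
--     active = [p for p in PLAYER_COLS if row.get(p, "F") != "F"]
--     return sorted(active, key=lambda p: ORDER_RANK[POSITIONS[p]])
-- ===== Notes on version B (the rewrite author's own statement) =====
-- stated objective: idiomatic
-- what changed: Replaced the nested scan over POSTFLOP_ORDER x active players with a precomputed rank dict and a single key-based sort of the active players.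
import Mathlib
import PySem

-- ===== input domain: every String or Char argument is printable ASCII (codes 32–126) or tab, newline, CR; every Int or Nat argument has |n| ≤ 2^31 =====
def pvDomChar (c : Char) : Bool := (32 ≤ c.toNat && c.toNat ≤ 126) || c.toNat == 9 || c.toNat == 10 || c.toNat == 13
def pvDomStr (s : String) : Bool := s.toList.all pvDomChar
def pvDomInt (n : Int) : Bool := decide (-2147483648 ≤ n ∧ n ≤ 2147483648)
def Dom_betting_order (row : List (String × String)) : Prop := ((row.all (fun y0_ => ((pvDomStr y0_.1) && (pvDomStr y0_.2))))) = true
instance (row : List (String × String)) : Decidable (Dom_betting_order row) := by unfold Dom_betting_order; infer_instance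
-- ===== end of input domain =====

-- B replaces A's nested position/player scans by a rank dict plus one key-based sort (idiomatic).

-- ===== PORT A =====
-- PLAYER_COLS = [f"P{i}" for i in range(1, 9)]
def pvPlayerCols : List String := (PySem.List.pyRange 1 9 1).map (fun i => "P" ++ PySem.Int.toStr i)

def pvPositions : PySem.Dict String String :=
  PySem.Dict.ofList [("P1", "BTN"), ("P2", "SB"), ("P3", "BB"), ("P4", "UTG"),
                     ("P5", "UTG+1"), ("P6", "MP"), ("P7", "HJ"), ("P8", "CO")]

def pvPostflopOrder : List String := ["SB", "BB", "UTG", "UTG+1", "MP", "HJ", "CO", "BTN"]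

-- active_players(row): [p for p in PLAYER_COLS if row.get(p, "F") != "F"]
def pvActivePlayers (row : List (String × String)) : List String :=
  pvPlayerCols.filter (fun p => (PySem.Dict.mk row).getD p "F" != "F")

-- POSITIONS[p]: exact here since every p drawn from PLAYER_COLS is a key of POSITIONS (never a KeyError)
def pvPosOf (p : String) : String := (pvPositions.get? p).getD ""

def betting_order (row : List (String × String)) : List String :=
  let active := pvActivePlayers row
  pvPostflopOrder.foldl (fun ordered pos =>
    active.foldl (fun ordered p => if pvPosOf p == pos then ordered ++ [p] else ordered) ordered) []

-- ===== PORT B =====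
-- ORDER_RANK = {pos: i for i, pos in enumerate(POSTFLOP_ORDER)}
def pvOrderRank : PySem.Dict String Int :=
  PySem.Dict.ofList ((PySem.List.enumerate pvPostflopOrder 0).map (fun ip => (ip.2, ip.1)))

-- ORDER_RANK[...]: exact here since every position of an active player is in POSTFLOP_ORDER (never a KeyError)
def pvRankKey (p : String) : Int := (pvOrderRank.get? (pvPosOf p)).getD 0

def betting_order_alt (row : List (String × String)) : List String :=
  let active := pvPlayerCols.filter (fun p => (PySem.Dict.mk row).getD p "F" != "F")
  PySem.List.sorted active pvRankKey false

-- ===== PRECONDITION & SPEC =====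
def Spec_betting_order (row : List (String × String)) (out : List String) : Prop := out = betting_order_alt row
instance (row : List (String × String)) (out : List String) : Decidable (Spec_betting_order row out) := by unfold Spec_betting_order; infer_instance

-- ===== CLAIM (what is proved, stated in full; the proofs are below) =====
def Claim_equal_betting_order : Prop := ∀ (row : List (String × String)), Dom_betting_order row → Spec_betting_order row (betting_order row)

-- ===== LEMMAS AND PROOFS =====

-- the selection of active players from the fixed 8-column list, as 8 booleans
def pvSel (b1 b2 b3 b4 b5 b6 b7 b8 : Bool) : List String :=
  (if b1 then ["P1"] else []) ++ (if b2 then ["P2"] else []) ++ (if b3 then ["P3"] else []) ++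
  (if b4 then ["P4"] else []) ++ (if b5 then ["P5"] else []) ++ (if b6 then ["P6"] else []) ++
  (if b7 then ["P7"] else []) ++ (if b8 then ["P8"] else [])

lemma pvPlayerCols_eq : pvPlayerCols = ["P1", "P2", "P3", "P4", "P5", "P6", "P7", "P8"] := by decide

lemma filter_cols_eq_sel (pred : String → Bool) :
    pvPlayerCols.filter pred =
      pvSel (pred "P1") (pred "P2") (pred "P3") (pred "P4") (pred "P5") (pred "P6") (pred "P7") (pred "P8") := by
  rw [pvPlayerCols_eq]
  simp only [List.filter, pvSel]
  cases pred "P1" <;> cases pred "P2" <;> cases pred "P3" <;> cases pred "P4" <;>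
    cases pred "P5" <;> cases pred "P6" <;> cases pred "P7" <;> cases pred "P8" <;> rfl

lemma core_eq : ∀ b1 b2 b3 b4 b5 b6 b7 b8 : Bool,
    pvPostflopOrder.foldl (fun ordered pos =>
      (pvSel b1 b2 b3 b4 b5 b6 b7 b8).foldl
        (fun ordered p => if pvPosOf p == pos then ordered ++ [p] else ordered) ordered) [] =
    PySem.List.sorted (pvSel b1 b2 b3 b4 b5 b6 b7 b8) pvRankKey false := by
  decide

-- ===== VERDICT (by name: the statement is the Claim_ definition above) =====
theorem betting_order_spec : Claim_equal_betting_order := by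
  intro row _
  unfold Spec_betting_order betting_order betting_order_alt pvActivePlayers
  rw [filter_cols_eq_sel, core_eq]
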